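-- pv_equiv track=rewrite | github.com/Person-Maink/localmodels- | analysis/Frequency Analysis/Run All.py | _canonical_clip_id
-- ===== SOURCE A (Python) =====
-- COMP_SUFFIXES = ("_amplified_modified", "_amplified", "_modified")
--
-- def _canonical_clip_id(clip_id):
--     base = clip_id
--     changed = True
--     while changed:
--         changed = False
--         for suffix in COMP_SUFFIXES:
--             if base.endswith(suffix):
--                 base = base[: -len(suffix)]
--                 changed = True
--                 break
--     return base
-- ===== SOURCE B (Python) =====
-- COMP_SUFFIXES = ("_amplified_modified", "_amplified", "_modified")
--
-- def _canonical_clip_id(clip_id):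
--     for suffix in COMP_SUFFIXES:
--         if clip_id.endswith(suffix):
--             return _canonical_clip_id(clip_id[: -len(suffix)])
--     return clip_id
-- ===== Notes on version B (the rewrite author's own statement) =====
-- stated objective: simpler
-- what changed: Replaces the while/changed-flag loop with a recursive fixpoint: recurse on the first matching suffix stripped, return unchanged when no suffix matches.
import Mathlib
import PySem

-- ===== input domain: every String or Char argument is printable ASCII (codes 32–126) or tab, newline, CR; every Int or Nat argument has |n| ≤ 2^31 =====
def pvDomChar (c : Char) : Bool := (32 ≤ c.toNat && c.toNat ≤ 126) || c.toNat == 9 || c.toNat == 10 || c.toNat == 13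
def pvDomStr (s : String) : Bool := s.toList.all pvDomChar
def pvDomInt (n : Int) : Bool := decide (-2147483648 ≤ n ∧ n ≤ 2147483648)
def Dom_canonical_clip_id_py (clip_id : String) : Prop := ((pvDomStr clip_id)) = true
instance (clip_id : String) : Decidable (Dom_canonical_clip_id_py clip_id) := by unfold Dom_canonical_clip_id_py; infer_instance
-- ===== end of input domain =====

-- One honest line: B replaces A's while/changed-flag loop with a recursive fixpoint
-- (recurse on the first matching suffix stripped); same values, objective: simpler.

-- COMP_SUFFIXES = ("_amplified_modified", "_amplified", "_modified")
def pvCompSuffixes : List String := ["_amplified_modified", "_amplified", "_modified"]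

-- base[: -len(suffix)]  (exact: PySem slice with negative stop)
def pvStrip (base suffix : String) : String :=
  PySem.Str.slice base none (some (-(PySem.Str.len suffix : Int)))

-- every COMP_SUFFIX is nonempty; used only for termination of the loops below
theorem pvSuffixes_pos : ∀ suf ∈ pvCompSuffixes, 0 < suf.toList.length := by decide

theorem pvStrip_lt {base suffix : String}
    (h : PySem.Chars.endswith base.toList suffix.toList = true) (hpos : 0 < suffix.toList.length) :
    (pvStrip base suffix).toList.length < base.toList.length := by
  have hle : suffix.toList.length ≤ base.toList.length :=
    ((PySem.Chars.endswith_iff (s := base.toList) (p := suffix.toList)).mp h).length_le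
  have hpos' : 0 < suffix.length := by simpa using hpos
  have hle' : suffix.length ≤ base.length := by simpa using hle
  simp [pvStrip, PySem.List.slice_to_neg_natCast _ _ hpos']
  omega

-- ===== PORT A =====
-- the inner 'for suffix in COMP_SUFFIXES: … break' of A: returns (base, changed)
def pvForA : List String → String → String × Bool
  | [], base => (base, false)
  | suffix :: rest, base =>
      if PySem.Str.endswith base suffix then (pvStrip base suffix, true)
      else pvForA rest base

theorem pvForA_true_lt : ∀ (l : List String) (base b : String),
    (∀ suf ∈ l, 0 < suf.toList.length) →
    pvForA l base = (b, true) → b.toList.length < base.toList.length := by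
  intro l
  induction l with
  | nil => intro base b _ h; simp [pvForA] at h
  | cons suffix rest ih =>
      intro base b hpos h
      by_cases he : PySem.Chars.endswith base.toList suffix.toList = true
      · simp [pvForA, he] at h
        exact h ▸ pvStrip_lt he (hpos suffix (by simp))
      · simp [pvForA, he] at h
        exact ih base b (fun s hs => hpos s (by simp [hs])) h

-- the outer 'while changed:' loop of A
def pvWhileA (base : String) : String :=
  match h : pvForA pvCompSuffixes base with
  | (b, true) => pvWhileA b
  | (b, false) => b
termination_by base.toList.length
decreasing_by exact pvForA_true_lt _ _ _ pvSuffixes_pos h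

def canonical_clip_id_py (clip_id : String) : String :=
  pvWhileA clip_id

-- ===== PORT B =====
-- Source B: on the first suffix clip_id ends with, recurse on the stripped string
def pvFirstMatch : List String → String → Option String
  | [], _ => none
  | suffix :: rest, s =>
      if PySem.Str.endswith s suffix then some suffix else pvFirstMatch rest s

theorem pvFirstMatch_some_lt : ∀ (l : List String) (s suf : String),
    (∀ x ∈ l, 0 < x.toList.length) →
    pvFirstMatch l s = some suf → (pvStrip s suf).toList.length < s.toList.length := by
  intro l
  induction l with
  | nil => intro s suf _ h; simp [pvFirstMatch] at h
  | cons suffix rest ih =>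
      intro s suf hpos h
      by_cases he : PySem.Chars.endswith s.toList suffix.toList = true
      · simp [pvFirstMatch, he] at h
        exact h ▸ pvStrip_lt he (hpos suffix (by simp))
      · simp [pvFirstMatch, he] at h
        exact ih s suf (fun x hx => hpos x (by simp [hx])) h

def canonical_clip_id_py_alt (clip_id : String) : String :=
  match h : pvFirstMatch pvCompSuffixes clip_id with
  | some suffix => canonical_clip_id_py_alt (pvStrip clip_id suffix)
  | none => clip_id
termination_by clip_id.toList.length
decreasing_by exact pvFirstMatch_some_lt _ _ _ pvSuffixes_pos h

-- ===== PRECONDITION & SPEC =====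
def Spec_canonical_clip_id_py (clip_id : String) (out : String) : Prop := out = canonical_clip_id_py_alt clip_id
instance (clip_id : String) (out : String) : Decidable (Spec_canonical_clip_id_py clip_id out) := by unfold Spec_canonical_clip_id_py; infer_instance

-- ===== CLAIM (what is proved, stated in full; the proofs are below) =====
def Claim_equal_canonical_clip_id_py : Prop := ∀ (clip_id : String), Dom_canonical_clip_id_py clip_id → Spec_canonical_clip_id_py clip_id (canonical_clip_id_py clip_id)

-- ===== LEMMAS AND PROOFS =====

-- A's inner for-loop result, phrased through B's first-match search
theorem pvForA_eq_firstMatch : ∀ (l : List String) (s : String),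
    pvForA l s = (match pvFirstMatch l s with
                  | some suf => (pvStrip s suf, true)
                  | none => (s, false)) := by
  intro l
  induction l with
  | nil => intro s; simp [pvForA, pvFirstMatch]
  | cons suffix rest ih =>
      intro s
      by_cases he : PySem.Chars.endswith s.toList suffix.toList = true
      · simp [pvForA, pvFirstMatch, he]
      · simp [pvForA, pvFirstMatch, he, ih]

theorem pvWhileA_unfold (s : String) :
    pvWhileA s = (match pvForA pvCompSuffixes s with
                  | (b, true) => pvWhileA b
                  | (b, false) => b) := by
  rw [pvWhileA.eq_def]
  split <;> rename_i b heq <;> rw [heq]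

theorem alt_unfold (s : String) :
    canonical_clip_id_py_alt s = (match pvFirstMatch pvCompSuffixes s with
                                  | some suf => canonical_clip_id_py_alt (pvStrip s suf)
                                  | none => s) := by
  rw [canonical_clip_id_py_alt.eq_def]
  split <;> rename_i heq <;> rw [heq]

theorem pvWhileA_eq_alt (s : String) : pvWhileA s = canonical_clip_id_py_alt s := by
  induction s using pvWhileA.induct with
  | case1 s b h ih =>
      have hfm := pvForA_eq_firstMatch pvCompSuffixes s
      rw [h] at hfm
      rw [pvWhileA_unfold, h, alt_unfold]
      cases hm : pvFirstMatch pvCompSuffixes s with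
      | none => rw [hm] at hfm; simp at hfm
      | some suf =>
          rw [hm] at hfm
          simp at hfm
          show pvWhileA b = canonical_clip_id_py_alt (pvStrip s suf)
          rw [← hfm]
          exact ih
  | case2 s b h =>
      have hfm := pvForA_eq_firstMatch pvCompSuffixes s
      rw [h] at hfm
      rw [pvWhileA_unfold, h, alt_unfold]
      cases hm : pvFirstMatch pvCompSuffixes s with
      | none =>
          rw [hm] at hfm; simp at hfm
          show b = s
          exact hfm
      | some suf => rw [hm] at hfm; simp at hfm

-- ===== VERDICT (by name: the statement is the Claim_ definition above) =====
theorem canonical_clip_id_py_spec : Claim_equal_canonical_clip_id_py := by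
  intro clip_id _
  unfold Spec_canonical_clip_id_py canonical_clip_id_py
  exact pvWhileA_eq_alt clip_id
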